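-- pv_equiv track=rewrite | github.com/Codyvanzandt/Advent-of-Code-2024 | day-01/solution.py | parse_puzzle_input
-- ===== SOURCE A (Python) =====
-- def parse_puzzle_input(puzzle_input):
--     lines = puzzle_input.strip().split('\n')
--     first_col = []
--     second_col = []
--     for line in lines:
--         if line:
--             num1, num2 = map(int, line.split())
--             first_col.append(num1)
--             second_col.append(num2)
--     return first_col, second_col
-- ===== SOURCE B (Python) =====
-- def parse_puzzle_input(puzzle_input):
--     # Tokenize the WHOLE input at once (str.split() splits on all whitespace,
--     # including newlines), parse every token, then de-interleave by stride slicing.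
--     nums = [int(token) for token in puzzle_input.split()]
--     return nums[0::2], nums[1::2]
-- ===== Notes on version B (the rewrite author's own statement) =====
-- stated objective: alternative
-- what changed: B abandons the line-by-line loop entirely: it tokenizes the whole input with a single str.split() over all whitespace, parses the flat token list, and recovers the two columns by stride slicing nums[0::2] / nums[1::2].
import Mathlib
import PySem

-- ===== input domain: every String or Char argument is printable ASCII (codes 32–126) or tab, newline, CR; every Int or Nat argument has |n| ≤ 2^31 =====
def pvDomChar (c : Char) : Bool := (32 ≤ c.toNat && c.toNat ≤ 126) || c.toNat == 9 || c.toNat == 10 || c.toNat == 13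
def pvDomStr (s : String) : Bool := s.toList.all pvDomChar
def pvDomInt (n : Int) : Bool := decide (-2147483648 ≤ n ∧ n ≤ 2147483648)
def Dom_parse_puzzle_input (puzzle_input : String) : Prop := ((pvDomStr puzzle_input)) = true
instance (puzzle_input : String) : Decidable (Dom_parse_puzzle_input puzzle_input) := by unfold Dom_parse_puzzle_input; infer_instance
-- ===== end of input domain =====

-- B drops the line-by-line loop: it tokenizes the whole input with one str.split() over all
-- whitespace, parses the flat token list, and recovers the columns by stride slicing (alternative).

-- ===== PORT A =====
-- 'puzzle_input.strip().split("\n")' (split? is none only for sep = "", so getD [] is exact)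
def pvLines (s : String) : List String :=
  (PySem.Str.split? (PySem.Str.strip s) "\n").getD []

-- 'num1, num2 = map(int, line.split())'; the getD 0 branches are unreachable under Pre_ (Python raises there)
def pvNum1 (line : String) : Int :=
  (((PySem.Str.split₀ line)[0]?).bind PySem.Int.ofStr?).getD 0
def pvNum2 (line : String) : Int :=
  (((PySem.Str.split₀ line)[1]?).bind PySem.Int.ofStr?).getD 0

def parse_puzzle_input (puzzle_input : String) : List Int × List Int :=
  (pvLines puzzle_input).foldl
    (fun (acc : List Int × List Int) line =>
      if line ≠ "" then (acc.1 ++ [pvNum1 line], acc.2 ++ [pvNum2 line]) else acc)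
    ([], [])

-- ===== PORT B =====
-- 'nums = [int(token) for token in puzzle_input.split()]'; the getD 0 branches are unreachable under Pre_ (int() raises there)
-- 'return nums[0::2], nums[1::2]'; slice? is none only for step = 0, so getD [] is exact
def parse_puzzle_input_alt (puzzle_input : String) : List Int × List Int :=
  let nums := (PySem.Str.split₀ puzzle_input).map (fun t => (PySem.Int.ofStr? t).getD 0)
  ((PySem.List.slice? nums (some 0) none 2).getD [],
   (PySem.List.slice? nums (some 1) none 2).getD [])

-- ===== PRECONDITION & SPEC =====
-- Pre_ excludes exactly the inputs on which Python A raises ValueError: a nonempty line whose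
-- whitespace-split is not exactly two int()-parsable tokens.
def Pre_parse_puzzle_input (puzzle_input : String) : Prop :=
  ((pvLines puzzle_input).all (fun line =>
    line == "" ||
      ((PySem.Str.split₀ line).length == 2 &&
        (PySem.Str.split₀ line).all (fun t => (PySem.Int.ofStr? t).isSome)))) = true
instance (puzzle_input : String) : Decidable (Pre_parse_puzzle_input puzzle_input) := by
  unfold Pre_parse_puzzle_input; infer_instance

def pvWitness_parse_puzzle_input : String := "1 2\n3 4"

def Spec_parse_puzzle_input (puzzle_input : String) (out : List Int × List Int) : Prop := out = parse_puzzle_input_alt puzzle_input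
instance (puzzle_input : String) (out : List Int × List Int) : Decidable (Spec_parse_puzzle_input puzzle_input out) := by unfold Spec_parse_puzzle_input; infer_instance

-- ===== CLAIM (what is proved, stated in full; the proofs are below) =====
def Claim_equal_parse_puzzle_input : Prop := ∀ (puzzle_input : String), Dom_parse_puzzle_input puzzle_input → Pre_parse_puzzle_input puzzle_input → Spec_parse_puzzle_input puzzle_input (parse_puzzle_input puzzle_input)

-- ===== LEMMAS AND PROOFS =====

-- ---- split₀ machinery: whole-string word split = concatenation of the per-line word splits ----

-- the output accumulator of split₀.go is a prefix
theorem pv_go_acc (s : List Char) (cur : List Char) (acc : List (List Char)) :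
    PySem.Chars.split₀.go s cur acc = acc.reverse ++ PySem.Chars.split₀.go s cur [] := by
  induction s generalizing cur acc with
  | nil => simp [PySem.Chars.split₀.go]; split_ifs <;> simp
  | cons c s ih =>
    simp only [PySem.Chars.split₀.go]
    split_ifs with h1 h2
    · rw [ih [] acc, ih [] []]
    · rw [ih [] (cur.reverse :: acc), ih [] [cur.reverse]]; simp
    · exact ih (c :: cur) acc

-- an all-whitespace run is ignored by split₀.go
theorem pv_go_spaces (ws : List Char) (hws : ∀ c ∈ ws, PySem.Chars.isspace c = true)
    (cur : List Char) (acc : List (List Char)) :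
    PySem.Chars.split₀.go ws cur acc = PySem.Chars.split₀.go [] cur acc := by
  induction ws generalizing cur acc with
  | nil => rfl
  | cons c ws ih =>
    have hc : PySem.Chars.isspace c = true := hws c (by simp)
    have hws' : ∀ c ∈ ws, PySem.Chars.isspace c = true := fun c hc => hws c (by simp [hc])
    simp only [PySem.Chars.split₀.go, hc, if_true]
    split_ifs with h
    · rw [ih hws' [] acc]; simp [PySem.Chars.split₀.go]
    · rw [ih hws' [] (cur.reverse :: acc)]
      simp [PySem.Chars.split₀.go]

-- a trailing all-whitespace run is ignored by split₀.go
theorem pv_go_append_spaces (xs ws : List Char) (hws : ∀ c ∈ ws, PySem.Chars.isspace c = true)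
    (cur : List Char) (acc : List (List Char)) :
    PySem.Chars.split₀.go (xs ++ ws) cur acc = PySem.Chars.split₀.go xs cur acc := by
  induction xs generalizing cur acc with
  | nil => simpa using pv_go_spaces ws hws cur acc
  | cons x xs ih =>
    simp only [List.cons_append, PySem.Chars.split₀.go]
    split_ifs <;> exact ih _ _

-- splitting at a single whitespace character splits the word list
theorem pv_split₀_append_space (c : Char) (hc : PySem.Chars.isspace c = true)
    (xs ys : List Char) :
    PySem.Chars.split₀ (xs ++ c :: ys) = PySem.Chars.split₀ xs ++ PySem.Chars.split₀ ys := by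
  suffices h : ∀ (xs cur : List Char),
      PySem.Chars.split₀.go (xs ++ c :: ys) cur [] =
        PySem.Chars.split₀.go xs cur [] ++ PySem.Chars.split₀.go ys [] [] by
    exact h xs []
  intro xs
  induction xs with
  | nil =>
    intro cur
    show PySem.Chars.split₀.go (c :: ys) cur [] = _
    by_cases h : cur.isEmpty
    · simp [PySem.Chars.split₀.go, hc, h]
    · rw [show PySem.Chars.split₀.go (c :: ys) cur [] =
          PySem.Chars.split₀.go ys [] [cur.reverse] from by
        simp [PySem.Chars.split₀.go, hc, h], pv_go_acc ys [] [cur.reverse]]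
      simp [PySem.Chars.split₀.go, h]
  | cons x xs ih =>
    intro cur
    simp only [List.cons_append, PySem.Chars.split₀.go]
    split_ifs with h1 h2
    · exact ih []
    · rw [pv_go_acc (xs ++ c :: ys) [] [cur.reverse], pv_go_acc xs [] [cur.reverse], ih []]
      simp
    · exact ih (x :: cur)

-- leading whitespace is ignored by split₀
theorem pv_split₀_lstrip (t : List Char) :
    PySem.Chars.split₀ (PySem.Chars.lstrip t) = PySem.Chars.split₀ t := by
  induction t with
  | nil => rfl
  | cons c t ih =>
    by_cases hc : PySem.Chars.isspace c = true
    · have h1 : PySem.Chars.lstrip (c :: t) = PySem.Chars.lstrip t := by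
        simp [PySem.Chars.lstrip, hc]
      rw [h1, ih]
      show PySem.Chars.split₀.go t [] [] = PySem.Chars.split₀.go (c :: t) [] []
      simp [PySem.Chars.split₀.go, hc]
    · simp [PySem.Chars.lstrip, hc]

-- stripping (both ends) does not change the word list
theorem pv_split₀_strip (t : List Char) :
    PySem.Chars.split₀ (PySem.Chars.strip t) = PySem.Chars.split₀ t := by
  unfold PySem.Chars.strip
  rw [← pv_split₀_lstrip t]
  generalize PySem.Chars.lstrip t = u
  unfold PySem.Chars.rstrip
  have hdecomp : u = (List.dropWhile PySem.Chars.isspace u.reverse).reverse ++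
      (List.takeWhile PySem.Chars.isspace u.reverse).reverse := by
    rw [← List.reverse_append, List.takeWhile_append_dropWhile, List.reverse_reverse]
  conv_rhs => rw [hdecomp]
  exact (pv_go_append_spaces _ _
    (fun c hcm => List.mem_takeWhile_imp (List.mem_reverse.mp hcm)) [] []).symm

-- the '\n'-split pieces of a string carry the same words, in order
theorem pv_splitOn_go_flatMap (fuel : Nat) :
    ∀ (l cur : List Char) (acc : List (List Char)), l.length < fuel →
      (PySem.Chars.splitOn.go ['\n'] fuel l cur acc).flatMap PySem.Chars.split₀ =
        acc.reverse.flatMap PySem.Chars.split₀ ++ PySem.Chars.split₀ (cur.reverse ++ l) := by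
  induction fuel with
  | zero => intro l cur acc h; omega
  | succ f ih =>
    intro l cur acc h
    cases l with
    | nil => simp [PySem.Chars.splitOn.go]
    | cons c rest =>
      by_cases hc : c = '\n'
      · subst hc
        have hpre : ['\n'].isPrefixOf ('\n' :: rest) = true := by
          simp [List.isPrefixOf]
        rw [show PySem.Chars.splitOn.go ['\n'] (f + 1) ('\n' :: rest) cur acc =
            PySem.Chars.splitOn.go ['\n'] f rest [] (cur.reverse :: acc) from by
          simp [PySem.Chars.splitOn.go, hpre]]
        rw [ih rest [] (cur.reverse :: acc) (by simp at h; omega)]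
        rw [pv_split₀_append_space '\n' (by decide) cur.reverse rest]
        simp
      · have hpre : ['\n'].isPrefixOf (c :: rest) = false := by
          simp [List.isPrefixOf]
          exact fun heq => hc heq.symm
        rw [show PySem.Chars.splitOn.go ['\n'] (f + 1) (c :: rest) cur acc =
            PySem.Chars.splitOn.go ['\n'] f rest (c :: cur) acc from by
          simp [PySem.Chars.splitOn.go, hpre]]
        rw [ih rest (c :: cur) acc (by simp at h; omega)]
        simp

theorem pv_splitOn_flatMap (t : List Char) :
    (PySem.Chars.splitOn t ['\n']).flatMap PySem.Chars.split₀ = PySem.Chars.split₀ t := by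
  unfold PySem.Chars.splitOn
  rw [pv_splitOn_go_flatMap (t.length + 1) t [] [] (by omega)]
  simp

-- A's lines, moved to char lists: exactly the '\n'-split of the stripped input
theorem pv_lines_toList (s : String) :
    (pvLines s).map String.toList =
      PySem.Chars.splitOn (PySem.Chars.strip s.toList) ['\n'] := by
  unfold pvLines
  have h := PySem.Str.split?_map (PySem.Str.strip s) "\n"
  have hsep : ("\n" : String).toList = ['\n'] := rfl
  rw [hsep, PySem.Str.toList_strip] at h
  rw [show PySem.Chars.split? (PySem.Chars.strip s.toList) ['\n'] =
      some (PySem.Chars.splitOn (PySem.Chars.strip s.toList) ['\n']) from by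
    simp [PySem.Chars.split?]] at h
  cases hx : PySem.Str.split? (PySem.Str.strip s) "\n" with
  | none => rw [hx] at h; simp at h
  | some L => rw [hx] at h; simpa using h

-- whole-input word split = concatenation of per-line word splits (on strings)
theorem pv_tokens_flatMap (s : String) :
    PySem.Str.split₀ s = (pvLines s).flatMap PySem.Str.split₀ := by
  have hinj : Function.Injective (List.map String.toList) :=
    List.map_injective_iff.mpr (fun a b hab => String.toList_inj.mp hab)
  apply hinj
  rw [PySem.Str.split₀_map_toList, List.map_flatMap]
  simp only [PySem.Str.split₀_map_toList]
  calc PySem.Chars.split₀ s.toList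
      = PySem.Chars.split₀ (PySem.Chars.strip s.toList) := (pv_split₀_strip _).symm
    _ = (PySem.Chars.splitOn (PySem.Chars.strip s.toList) ['\n']).flatMap
          PySem.Chars.split₀ := (pv_splitOn_flatMap _).symm
    _ = ((pvLines s).map String.toList).flatMap PySem.Chars.split₀ := by
          rw [pv_lines_toList s]
    _ = (pvLines s).flatMap (fun l => PySem.Chars.split₀ l.toList) := by
          rw [List.flatMap_map]

-- empty lines contribute no words, so the filter of A's loop can be dropped from the flatMap
theorem pv_flatMap_filter (L : List String) :
    (L.filter (fun l => l ≠ "")).flatMap PySem.Str.split₀ = L.flatMap PySem.Str.split₀ := by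
  have hemp : PySem.Str.split₀ "" = [] := rfl
  induction L with
  | nil => rfl
  | cons l L ih =>
    simp only [ne_eq, decide_not] at ih
    by_cases h : l = "" <;> simp [h, hemp, ih]

-- ---- A's fold, characterised as two filtered maps ----
theorem pv_foldA (L : List String) (as bs : List Int) :
    L.foldl
      (fun (acc : List Int × List Int) line =>
        if line ≠ "" then (acc.1 ++ [pvNum1 line], acc.2 ++ [pvNum2 line]) else acc)
      (as, bs)
    = (as ++ (L.filter (fun l => l ≠ "")).map pvNum1,
       bs ++ (L.filter (fun l => l ≠ "")).map pvNum2) := by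
  induction L generalizing as bs with
  | nil => simp
  | cons l L ih =>
    simp only [List.foldl_cons]
    by_cases h : l = ""
    · rw [if_neg (fun hne => hne h), ih]
      simp [h]
    · rw [if_pos h, ih]
      simp [h]

-- ---- stride slices of a flattened pair list ----
theorem pv_len_pairs (P : List (Int × Int)) :
    (P.flatMap (fun p => [p.1, p.2])).length = 2 * P.length := by
  induction P with
  | nil => rfl
  | cons p P ih => simp only [List.flatMap_cons, List.length_append, List.length_cons, ih]; simp; omega

theorem pv_slice_even (xs : List Int) (m : Nat) (h : xs.length = 2 * m) :
    PySem.List.slice? xs (some 0) none 2 =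
      some (List.filterMap (fun k => xs[2 * k]?) (List.range m)) := by
  simp [PySem.List.slice?, PySem.List.sliceIndices]
  simp only [h]
  have hc : (if 0 < 2 * m then ((((2 * m : Nat) : Int) + 2 - 1) / 2).toNat else 0) = m := by
    split_ifs with h1
    · push_cast; omega
    · omega
  rw [hc]
  apply List.filterMap_congr
  intro k _
  congr 1

theorem pv_slice_odd (xs : List Int) (m : Nat) (h : xs.length = 2 * m) :
    PySem.List.slice? xs (some 1) none 2 =
      some (List.filterMap (fun k => xs[2 * k + 1]?) (List.range m)) := by
  rcases Nat.eq_zero_or_pos m with hm | hm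
  · subst hm
    have hx : xs = [] := List.eq_nil_of_length_eq_zero (by omega)
    subst hx
    simp [PySem.List.slice?, PySem.List.sliceIndices]
  · simp [PySem.List.slice?, PySem.List.sliceIndices]
    simp only [h]
    have hmin : min (1 : Int) ((2 * m : Nat) : Int) = 1 := by push_cast; omega
    simp only [hmin]
    have hc : (if 1 < 2 * m then ((((2 * m : Nat) : Int) - 1 + 2 - 1) / 2).toNat else 0) = m := by
      split_ifs with h1
      · push_cast; omega
      · omega
    rw [hc]
    apply List.filterMap_congr
    intro k _
    congr 1
    omega

theorem pv_evens_map (P : List (Int × Int)) :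
    (List.range P.length).map (fun k => (P.flatMap (fun p => [p.1, p.2])).getD (2 * k) 0) =
      P.map Prod.fst := by
  induction P with
  | nil => simp
  | cons p P ih =>
    have hL : (p :: P).flatMap (fun p => [p.1, p.2])
        = p.1 :: p.2 :: P.flatMap (fun p => [p.1, p.2]) := by simp
    rw [hL, List.length_cons, List.range_succ_eq_map, List.map_cons, List.map_map]
    simp only [Nat.mul_zero, List.getD_cons_zero, List.map_cons]
    -- the shifted tail function is definitionally the induction hypothesis' function
    congr 1

theorem pv_odds_map (P : List (Int × Int)) :
    (List.range P.length).map (fun k => (P.flatMap (fun p => [p.1, p.2])).getD (2 * k + 1) 0) =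
      P.map Prod.snd := by
  induction P with
  | nil => simp
  | cons p P ih =>
    have hL : (p :: P).flatMap (fun p => [p.1, p.2])
        = p.1 :: p.2 :: P.flatMap (fun p => [p.1, p.2]) := by simp
    rw [hL, List.length_cons, List.range_succ_eq_map, List.map_cons, List.map_map]
    simp only [Nat.mul_zero, Nat.zero_add, List.getD_cons_succ, List.getD_cons_zero, List.map_cons]
    -- the shifted tail function is definitionally the induction hypothesis' function
    congr 1

theorem pv_evens (P : List (Int × Int)) :
    List.filterMap (fun k => (P.flatMap (fun p => [p.1, p.2]))[2 * k]?) (List.range P.length) =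
      P.map Prod.fst := by
  rw [List.filterMap_congr
    (g := fun k => some ((P.flatMap (fun p => [p.1, p.2])).getD (2 * k) 0)) ?_]
  · rw [show (fun k => some ((P.flatMap (fun p => [p.1, p.2])).getD (2 * k) 0))
        = some ∘ (fun k => (P.flatMap (fun p => [p.1, p.2])).getD (2 * k) 0) from rfl,
      List.filterMap_eq_map]
    exact pv_evens_map P
  · intro k hk
    rw [List.mem_range] at hk
    have hlt : 2 * k < (P.flatMap (fun p => [p.1, p.2])).length := by
      rw [pv_len_pairs]; omega
    simp only [List.getElem?_eq_getElem hlt, List.getD_eq_getElem _ _ hlt]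

theorem pv_odds (P : List (Int × Int)) :
    List.filterMap (fun k => (P.flatMap (fun p => [p.1, p.2]))[2 * k + 1]?) (List.range P.length) =
      P.map Prod.snd := by
  rw [List.filterMap_congr
    (g := fun k => some ((P.flatMap (fun p => [p.1, p.2])).getD (2 * k + 1) 0)) ?_]
  · rw [show (fun k => some ((P.flatMap (fun p => [p.1, p.2])).getD (2 * k + 1) 0))
        = some ∘ (fun k => (P.flatMap (fun p => [p.1, p.2])).getD (2 * k + 1) 0) from rfl,
      List.filterMap_eq_map]
    exact pv_odds_map P
  · intro k hk
    rw [List.mem_range] at hk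
    have hlt : 2 * k + 1 < (P.flatMap (fun p => [p.1, p.2])).length := by
      rw [pv_len_pairs]; omega
    simp only [List.getElem?_eq_getElem hlt, List.getD_eq_getElem _ _ hlt]

-- ===== VERDICT (by name: the statement is the Claim_ definition above) =====
theorem parse_puzzle_input_spec : Claim_equal_parse_puzzle_input := by
  intro s _ hpre
  unfold Pre_parse_puzzle_input at hpre
  rw [List.all_eq_true] at hpre
  unfold Spec_parse_puzzle_input parse_puzzle_input parse_puzzle_input_alt
  rw [pv_foldA (pvLines s) [] []]
  simp only [List.nil_append]
  have hnums : (PySem.Str.split₀ s).map (fun t => (PySem.Int.ofStr? t).getD 0)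
      = (((pvLines s).filter (fun l => l ≠ "")).map (fun l => (pvNum1 l, pvNum2 l))).flatMap
          (fun p => [p.1, p.2]) := by
    rw [pv_tokens_flatMap s, ← pv_flatMap_filter (pvLines s), List.map_flatMap,
      List.flatMap_map]
    apply List.flatMap_congr
    intro l hl
    rcases List.mem_filter.mp hl with ⟨hl1, hl2⟩
    have hne : l ≠ "" := by simpa using hl2
    have h2 := hpre l hl1
    rw [Bool.or_eq_true, Bool.and_eq_true] at h2
    rcases h2 with h2 | ⟨hlen, _⟩
    · exact absurd (by simpa using h2) hne
    · have hlen2 : (PySem.Str.split₀ l).length = 2 := by simpa using hlen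
      rcases List.length_eq_two.mp hlen2 with ⟨a, b, hab⟩
      simp [hab, pvNum1, pvNum2]
  rw [hnums]
  rw [pv_slice_even _ _ (pv_len_pairs _), pv_slice_odd _ _ (pv_len_pairs _)]
  simp only [Option.getD_some]
  rw [pv_evens, pv_odds]
  simp [List.map_map, Function.comp]
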